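-- pv_equiv track=rewrite | github.com/jbarnoud/splitleafs | test_splitleafs.py | read_ndx
-- ===== SOURCE A (Python) =====
-- def read_ndx(infile):
--     """
--     Read a GROMACS index file and return a dictionary.
--
--     :Parameters:
--         - infile : a file descriptor like instance of a ndx file
--
--     :Return:
--         - A dictionary like {group name : list of indices}.
--     """
--     indices = {}
--     current_group = None
--     groups = []
--     for line in infile:
--         # Remove comments if any
--         comment_start = line.find(";")
--         if comment_start > -1:
--             line = line[:comment_start]
--         if "[" in line:
--             current_group = line
--             current_group = current_group.replace("[", "")
--             current_group = current_group.replace("]", "")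
--             current_group = current_group.strip()
--             groups.append(current_group)
--             indices[current_group] = []
--         elif not current_group is None:
--             indices[current_group] += [int(i) for i in line.split()]
--     return indices
-- ===== SOURCE B (Python) =====
-- def _decomment(line):
--     comment_start = line.find(";")
--     if comment_start > -1:
--         line = line[:comment_start]
--     return line
--
--
-- def read_ndx(infile):
--     # Two-level decomposition: strip comments once, scan to the first header,
--     # then consume one whole section per outer step and insert its group once.
--     clean = [_decomment(line) for line in infile]
--     n = len(clean)
--     i = 0
--     while i < n and "[" not in clean[i]:
--         i += 1
--     indices = {}
--     while i < n:
--         name = clean[i].replace("[", "").replace("]", "").strip()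
--         j = i + 1
--         values = []
--         while j < n and "[" not in clean[j]:
--             values.extend(int(tok) for tok in clean[j].split())
--             j += 1
--         indices[name] = values
--         i = j
--     return indices
-- ===== Notes on version B (the rewrite author's own statement) =====
-- stated objective: alternative
-- what changed: Replaces A's single-pass state machine (current_group variable, per-line dict-append with reset) by a two-level section decomposition: strip comments, skip the preamble to the first header, then consume one whole section per outer step and insert each group's complete index list once.
import Mathlib
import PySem

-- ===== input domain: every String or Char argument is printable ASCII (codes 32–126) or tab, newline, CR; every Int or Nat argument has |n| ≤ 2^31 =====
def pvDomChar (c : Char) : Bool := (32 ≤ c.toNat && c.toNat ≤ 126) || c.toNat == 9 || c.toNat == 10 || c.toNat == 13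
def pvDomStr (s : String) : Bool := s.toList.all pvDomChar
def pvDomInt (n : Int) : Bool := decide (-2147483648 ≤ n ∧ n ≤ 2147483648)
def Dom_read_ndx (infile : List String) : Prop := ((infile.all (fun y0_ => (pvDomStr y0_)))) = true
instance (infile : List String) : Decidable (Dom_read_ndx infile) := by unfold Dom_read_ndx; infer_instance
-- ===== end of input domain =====

-- B replaces A's per-line state machine (current-group variable, per-line dict append) by a
-- two-level section decomposition (skip preamble, then one dict insert per whole section);
-- objective: alternative decomposition, same cost.

-- shared helpers (the same Python statements appear verbatim in both Source A and Source B)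
-- comment stripping: line.find(";"); if > -1: line = line[:comment_start]
def pvClean (line : String) : String :=
  let comment_start := PySem.Str.find line ";"
  if comment_start > -1 then PySem.Str.slice line none (some comment_start) else line

-- "[" in line
def pvIsHeader (line : String) : Bool := PySem.Str.isIn "[" line

-- line.replace("[","").replace("]","").strip()
def pvName (line : String) : String :=
  PySem.Str.strip (PySem.Str.replace (PySem.Str.replace line "[" "") "]" "")

-- [int(i) for i in line.split()]  (ofStr? = none is exactly where int() raises; Pre_ excludes that)
def pvInts (line : String) : List Int :=
  (PySem.Str.split₀ line).filterMap PySem.Int.ofStr?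

-- ===== PORT A =====
-- loop body of A on the already-decommented line, over state (indices, current_group, groups)
def pvStepA (st : PySem.Dict String (List Int) × Option String × List String) (line : String) :
    PySem.Dict String (List Int) × Option String × List String :=
  if pvIsHeader line then
    let g := pvName line
    (st.1.insert g [], some g, st.2.2 ++ [g])
  else
    match st.2.1 with
    | some g => (st.1.insert g (st.1.getD g [] ++ pvInts line), st.2.1, st.2.2)
    | none => st

def read_ndx (infile : List String) : List (String × List Int) :=
  (infile.foldl (fun st line => pvStepA st (pvClean line)) (PySem.Dict.empty, none, [])).1.items

-- ===== PORT B =====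
-- B's outer while-loop: consume one whole section (header + its data lines) per step
def pvSections : List String → PySem.Dict String (List Int) → PySem.Dict String (List Int)
  | [], indices => indices
  | h :: rest, indices =>
    let body := rest.takeWhile (fun l => !pvIsHeader l)
    let rest' := rest.dropWhile (fun l => !pvIsHeader l)
    pvSections rest' (indices.insert (pvName h) (body.flatMap pvInts))
termination_by ls _ => ls.length
decreasing_by
  exact Nat.lt_succ_of_le (List.length_dropWhile_le _ _)

def read_ndx_alt (infile : List String) : List (String × List Int) :=
  (pvSections ((infile.map pvClean).dropWhile (fun l => !pvIsHeader l)) PySem.Dict.empty).items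

-- ===== PRECONDITION & SPEC =====
-- data lines (decommented, after the first header, not themselves headers): int() must not raise there
def pvDataLines (infile : List String) : List String :=
  ((infile.map pvClean).dropWhile (fun l => !pvIsHeader l)).filter (fun l => !pvIsHeader l)

-- Pre_ excludes exactly the inputs on which Python A raises ValueError: a data line carrying a
-- whitespace-separated token that is not a valid int literal.
def Pre_read_ndx (infile : List String) : Prop :=
  ∀ l ∈ pvDataLines infile, ∀ tok ∈ PySem.Str.split₀ l, (PySem.Int.ofStr? tok).isSome
instance (infile : List String) : Decidable (Pre_read_ndx infile) := by unfold Pre_read_ndx; infer_instance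

def pvWitness_read_ndx : List String := ["; system", "[ Protein ]", "1 2 3", "[SOL] ; water", "7"]

def Spec_read_ndx (infile : List String) (out : List (String × List Int)) : Prop := out = read_ndx_alt infile
instance (infile : List String) (out : List (String × List Int)) : Decidable (Spec_read_ndx infile out) := by unfold Spec_read_ndx; infer_instance

-- ===== CLAIM (what is proved, stated in full; the proofs are below) =====
def Claim_equal_read_ndx : Prop := ∀ (infile : List String), Dom_read_ndx infile → Pre_read_ndx infile → Spec_read_ndx infile (read_ndx infile)

-- ===== LEMMAS AND PROOFS =====

-- Inside a section: A's per-line appends into group g amount to one insert of the whole body.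
theorem pv_fold_in_group (ls : List String) (d : PySem.Dict String (List Int))
    (g : String) (v : List Int) (gs : List String) :
    (ls.foldl pvStepA (d.insert g v, some g, gs)).1 =
      pvSections (ls.dropWhile (fun l => !pvIsHeader l))
        (d.insert g (v ++ (ls.takeWhile (fun l => !pvIsHeader l)).flatMap pvInts)) := by
  induction ls generalizing d g v gs with
  | nil => simp [pvSections]
  | cons l ls ih =>
    by_cases hh : pvIsHeader l = true
    · have hdrop : List.dropWhile (fun x => !pvIsHeader x) (l :: ls) = l :: ls := by
        simp [hh]
      have htake : List.takeWhile (fun x => !pvIsHeader x) (l :: ls) = ([] : List String) := by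
        simp [hh]
      rw [hdrop, htake, pvSections]
      simp only [List.foldl_cons, pvStepA, hh, if_true]
      rw [ih (d.insert g v) (pvName l) [] (gs ++ [pvName l])]
      simp
    · have hh' : pvIsHeader l = false := by simpa using hh
      have hdrop : List.dropWhile (fun x => !pvIsHeader x) (l :: ls) =
          List.dropWhile (fun x => !pvIsHeader x) ls := by
        simp [hh']
      have htake : List.takeWhile (fun x => !pvIsHeader x) (l :: ls) =
          l :: List.takeWhile (fun x => !pvIsHeader x) ls := by
        simp [hh']
      rw [hdrop, htake]
      simp only [List.foldl_cons, pvStepA, hh', Bool.false_eq_true, if_false]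
      rw [PySem.Dict.getD_insert_self, PySem.Dict.insert_insert_self,
        ih d g (v ++ pvInts l) gs]
      simp [List.append_assoc]

-- Before the first header A's loop leaves the state untouched; afterwards sections take over.
theorem pv_fold_main (ls : List String) (d : PySem.Dict String (List Int)) (gs : List String) :
    (ls.foldl pvStepA (d, none, gs)).1 =
      pvSections (ls.dropWhile (fun l => !pvIsHeader l)) d := by
  induction ls generalizing d gs with
  | nil => simp [pvSections]
  | cons l ls ih =>
    by_cases hh : pvIsHeader l = true
    · have hdrop : List.dropWhile (fun x => !pvIsHeader x) (l :: ls) = l :: ls := by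
        simp [hh]
      rw [hdrop, pvSections]
      simp only [List.foldl_cons, pvStepA, hh, if_true]
      rw [pv_fold_in_group ls d (pvName l) [] (gs ++ [pvName l])]
      simp
    · have hh' : pvIsHeader l = false := by simpa using hh
      have hdrop : List.dropWhile (fun x => !pvIsHeader x) (l :: ls) =
          List.dropWhile (fun x => !pvIsHeader x) ls := by
        simp [hh']
      rw [hdrop]
      simp only [List.foldl_cons, pvStepA, hh', Bool.false_eq_true, if_false]
      exact ih d gs

-- ===== VERDICT (by name: the statement is the Claim_ definition above) =====
theorem read_ndx_spec : Claim_equal_read_ndx := by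
  intro infile _ _
  unfold Spec_read_ndx read_ndx read_ndx_alt
  have h : List.foldl pvStepA
      ((PySem.Dict.empty : PySem.Dict String (List Int)), (none : Option String),
        ([] : List String)) (infile.map pvClean) =
      List.foldl (fun st line => pvStepA st (pvClean line))
        (PySem.Dict.empty, none, []) infile := List.foldl_map
  rw [← h, pv_fold_main]
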